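-- pv_equiv track=rewrite | github.com/pypi-data/pypi-mirror-248 | packages/OEISsequences/OEISsequences-0.2.3-py3-none-any.whl/oeis-sequences/OEISsequences-12-24-2021.py | paloddgen
-- ===== SOURCE A (Python) =====
-- def paloddgen(l, b=10):
--     """ generator of odd-length palindromes in base b of length <= 2*l """
--     if l > 0:
--         yield 0
--         for x in range(1, l+1):
--             n = b**(x-1)
--             n2 = n*b
--             for y in range(n, n2):
--                 k, m = y//b, 0
--                 while k >= b:
--                     k, r = divmod(k, b)
--                     m = b*m + r
--                 yield y*n + b*m + k
-- ===== SOURCE B (Python) =====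
-- def paloddgen(l, b=10):
--     """ generator of odd-length palindromes in base b of length <= 2*l """
--     if l > 0:
--         yield 0
--         for x in range(1, l+1):
--             for y in range(b**(x-1), b**x):
--                 ds = []
--                 t = y
--                 while t >= b:
--                     t, r = divmod(t, b)
--                     ds.append(r)
--                 ds.append(t)
--                 full = ds[::-1] + ds[1:]
--                 v = 0
--                 for d in full:
--                     v = v*b + d
--                 yield v
-- ===== Notes on version B (the rewrite author's own statement) =====
-- stated objective: alternative
-- what changed: B builds each palindrome as an explicit digit list (base-b digits of the half y followed by the mirror of its lower digits) and evaluates it with a single Horner pass, instead of A's reversal-accumulator arithmetic splice y*n + b*m + k.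
import Mathlib
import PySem

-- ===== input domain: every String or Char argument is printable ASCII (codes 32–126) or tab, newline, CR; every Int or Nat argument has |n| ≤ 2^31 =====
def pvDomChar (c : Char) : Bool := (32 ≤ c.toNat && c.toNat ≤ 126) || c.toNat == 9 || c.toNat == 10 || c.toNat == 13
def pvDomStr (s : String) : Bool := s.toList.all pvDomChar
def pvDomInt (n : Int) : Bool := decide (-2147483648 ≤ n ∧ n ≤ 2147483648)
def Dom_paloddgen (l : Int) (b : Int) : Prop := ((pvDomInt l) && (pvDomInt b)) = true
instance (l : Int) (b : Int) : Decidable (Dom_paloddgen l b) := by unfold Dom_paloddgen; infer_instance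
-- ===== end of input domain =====

-- B builds each palindrome as an explicit digit list and evaluates it with one Horner pass,
-- instead of A's in-place reversal accumulator and arithmetic splice (alternative decomposition, same cost).

-- ===== PORT A =====
-- A's inner 'while k >= b: k, r = divmod(k, b); m = b*m + r' loop; fuel bounds the iterations
-- (the callers pass fuel k.toNat + 1, which is ample whenever b ≥ 2, the only case the loop is reached under Pre_).
def pvAwhile (fuel : Nat) (b k m : Int) : Int × Int :=
  match fuel with
  | 0 => (k, m)
  | f + 1 =>
    if b ≤ k then pvAwhile f b (PySem.Int.floordiv k b) (b * m + PySem.Int.mod k b)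
    else (k, m)

def paloddgen (l : Int) (b : Int) : List Int :=
  if l > 0 then
    0 :: (PySem.List.pyRange 1 (l + 1) 1).flatMap (fun x =>
      let n := b ^ (x - 1).toNat
      let n2 := n * b
      (PySem.List.pyRange n n2 1).map (fun y =>
        let km := pvAwhile ((PySem.Int.floordiv y b).toNat + 1) b (PySem.Int.floordiv y b) 0
        y * n + b * km.2 + km.1))
  else []

-- ===== PORT B =====
-- B's 'while t >= b: t, r = divmod(t, b); ds.append(r)' digit-extraction loop, then 'ds.append(t)':
-- returns the little-endian digit list; same fuel discipline as pvAwhile.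
def pvDigits (fuel : Nat) (b t : Int) : List Int :=
  match fuel with
  | 0 => [t]
  | f + 1 =>
    if b ≤ t then PySem.Int.mod t b :: pvDigits f b (PySem.Int.floordiv t b)
    else [t]

def paloddgen_alt (l : Int) (b : Int) : List Int :=
  if l > 0 then
    0 :: (PySem.List.pyRange 1 (l + 1) 1).flatMap (fun x =>
      (PySem.List.pyRange (b ^ (x - 1).toNat) (b ^ x.toNat) 1).map (fun y =>
        let ds := pvDigits (y.toNat + 1) b y
        let full := ds.reverse ++ ds.drop 1
        full.foldl (fun v d => v * b + d) 0))
  else []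

-- ===== PRECONDITION & SPEC =====
-- Pre_ excludes only negative bases with l ≥ 2: there A's inner while loop never terminates
-- (k gets stuck at 0 ≥ b), so A returns on no such input; everywhere A returns, Pre_ holds.
def Pre_paloddgen (l : Int) (b : Int) : Prop := 0 ≤ b ∨ l ≤ 1
instance (l : Int) (b : Int) : Decidable (Pre_paloddgen l b) := by unfold Pre_paloddgen; infer_instance
def pvWitness_paloddgen : Int × Int := (2, 3)
def Spec_paloddgen (l : Int) (b : Int) (out : List Int) : Prop := out = paloddgen_alt l b
instance (l : Int) (b : Int) (out : List Int) : Decidable (Spec_paloddgen l b out) := by unfold Spec_paloddgen; infer_instance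

-- ===== CLAIM (what is proved, stated in full; the proofs are below) =====
def Claim_equal_paloddgen : Prop := ∀ (l : Int) (b : Int), Dom_paloddgen l b → Pre_paloddgen l b → Spec_paloddgen l b (paloddgen l b)

-- ===== LEMMAS AND PROOFS =====

-- Horner fold over an arbitrary accumulator splits into a power shift plus the zero-based fold.
theorem pv_horner_shift (b : Int) (l : List Int) : ∀ a : Int,
    l.foldl (fun v d => v * b + d) a = a * b ^ l.length + l.foldl (fun v d => v * b + d) 0 := by
  induction l with
  | nil => intro a; simp
  | cons d tl ih =>
    intro a
    simp only [List.foldl_cons, List.length_cons]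
    rw [ih (a * b + d), ih (0 * b + d)]
    ring

theorem pv_floordiv_nonneg (b t : Int) (hb : 0 < b) (ht : 0 ≤ t) : 0 ≤ PySem.Int.floordiv t b := by
  have h := (PySem.Int.le_floordiv_iff_mul_le (a := t) (b := b) (q := 0) hb).2 (by omega)
  exact h

theorem pv_floordiv_lt (b t : Int) (hb : 2 ≤ b) (ht : 1 ≤ t) : PySem.Int.floordiv t b < t := by
  refine (PySem.Int.floordiv_lt_iff_lt_mul (a := t) (b := b) (q := t) (by omega)).2 ?_
  nlinarith

-- reversing the little-endian digit list and Horner-evaluating it reconstructs t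
theorem pv_digits_rev (b : Int) (hb : 2 ≤ b) : ∀ (n : Nat) (t : Int) (f : Nat), 0 ≤ t → t.toNat ≤ n → t.toNat ≤ f →
    (pvDigits f b t).reverse.foldl (fun v d => v * b + d) 0 = t := by
  intro n
  induction n with
  | zero =>
    intro t f ht hn _
    have ht0 : t = 0 := by omega
    subst ht0
    have hno : ¬ b ≤ (0:Int) := by omega
    cases f <;> simp [pvDigits, hno]
  | succ n ih =>
    intro t f ht hn hf
    by_cases hbt : b ≤ t
    · have hf' : ∃ f', f = f' + 1 := by cases f with | zero => omega | succ f' => exact ⟨f', rfl⟩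
      obtain ⟨f', rfl⟩ := hf'
      have hq0 : 0 ≤ PySem.Int.floordiv t b := pv_floordiv_nonneg b t (by omega) ht
      have hqlt : PySem.Int.floordiv t b < t := pv_floordiv_lt b t hb (by omega)
      simp only [pvDigits, if_pos hbt, List.reverse_cons, List.foldl_append, List.foldl_cons, List.foldl_nil]
      rw [ih (PySem.Int.floordiv t b) f' hq0 (by omega) (by omega)]
      have := PySem.Int.floordiv_mul_add_mod t b
      linarith
    · cases f <;> simp [pvDigits, hbt]

theorem pv_digits_len (b : Int) (hb : 2 ≤ b) : ∀ (e : Nat) (t : Int) (f : Nat), b ^ e ≤ t → t < b ^ (e + 1) → t.toNat ≤ f →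
    (pvDigits f b t).length = e + 1 := by
  intro e
  induction e with
  | zero =>
    intro t f h1 h2 _
    rw [pow_zero] at h1
    rw [zero_add, pow_one] at h2
    have hno : ¬ b ≤ t := by omega
    cases f <;> simp [pvDigits, hno]
  | succ e ih =>
    intro t f h1 h2 hf
    have hpow : (1:Int) ≤ b ^ e := one_le_pow₀ (by omega)
    have hbt : b ≤ t := by
      have : b * 1 ≤ b ^ e * b := by nlinarith
      rw [pow_succ] at h1; nlinarith
    have hf' : ∃ f', f = f' + 1 := by cases f with | zero => omega | succ f' => exact ⟨f', rfl⟩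
    obtain ⟨f', rfl⟩ := hf'
    have hq1 : b ^ e ≤ PySem.Int.floordiv t b := by
      refine (PySem.Int.le_floordiv_iff_mul_le (by omega)).2 ?_
      rw [pow_succ] at h1; linarith
    have hq2 : PySem.Int.floordiv t b < b ^ (e + 1) := by
      refine (PySem.Int.floordiv_lt_iff_lt_mul (by omega)).2 ?_
      rw [pow_succ] at h2; exact h2
    have hqlt : PySem.Int.floordiv t b < t := pv_floordiv_lt b t hb (by omega)
    simp only [pvDigits, if_pos hbt, List.length_cons]
    rw [ih (PySem.Int.floordiv t b) f' hq1 hq2 (by omega)]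

theorem pv_awhile_eq (b : Int) (hb : 2 ≤ b) : ∀ (n : Nat) (t m : Int) (f g : Nat), 0 ≤ t → t.toNat ≤ n → t.toNat ≤ f → t.toNat ≤ g →
    b * (pvAwhile f b t m).2 + (pvAwhile f b t m).1
      = m * b ^ (pvDigits g b t).length + (pvDigits g b t).foldl (fun v d => v * b + d) 0 := by
  intro n
  induction n with
  | zero =>
    intro t m f g ht hn _ _
    have ht0 : t = 0 := by omega
    subst ht0
    have hno : ¬ b ≤ (0:Int) := by omega
    cases f <;> cases g <;> simp [pvAwhile, pvDigits, hno] <;> ring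
  | succ n ih =>
    intro t m f g ht hn hf hg
    by_cases hbt : b ≤ t
    · have hf' : ∃ f', f = f' + 1 := by cases f with | zero => omega | succ f' => exact ⟨f', rfl⟩
      have hg' : ∃ g', g = g' + 1 := by cases g with | zero => omega | succ g' => exact ⟨g', rfl⟩
      obtain ⟨f', rfl⟩ := hf'
      obtain ⟨g', rfl⟩ := hg'
      have hq0 : 0 ≤ PySem.Int.floordiv t b := pv_floordiv_nonneg b t (by omega) ht
      have hqlt : PySem.Int.floordiv t b < t := pv_floordiv_lt b t hb (by omega)
      simp only [pvAwhile, pvDigits, if_pos hbt, List.length_cons, List.foldl_cons]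
      rw [ih (PySem.Int.floordiv t b) (b * m + PySem.Int.mod t b) f' g' hq0 (by omega) (by omega) (by omega)]
      rw [pv_horner_shift b _ (0 * b + PySem.Int.mod t b)]
      ring
    · cases f <;> cases g <;> simp [pvAwhile, pvDigits, hbt] <;> ring


theorem pv_inner (b : Int) (hb : 2 ≤ b) (e : Nat) (y : Int) (h1 : b ^ e ≤ y) (h2 : y < b ^ (e + 1)) :
    y * b ^ e
      + b * (pvAwhile ((PySem.Int.floordiv y b).toNat + 1) b (PySem.Int.floordiv y b) 0).2
      + (pvAwhile ((PySem.Int.floordiv y b).toNat + 1) b (PySem.Int.floordiv y b) 0).1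
    = ((pvDigits (y.toNat + 1) b y).reverse ++ (pvDigits (y.toNat + 1) b y).drop 1).foldl
        (fun v d => v * b + d) 0 := by
  have hy1 : (1:Int) ≤ y := le_trans (one_le_pow₀ (by omega)) h1
  have hq0 : 0 ≤ PySem.Int.floordiv y b := pv_floordiv_nonneg b y (by omega) (by omega)
  have hqlt : PySem.Int.floordiv y b < y := pv_floordiv_lt b y hb hy1
  rw [List.foldl_append]
  rw [pv_digits_rev b hb y.toNat y (y.toNat + 1) (by omega) (by omega) (by omega)]
  rw [pv_horner_shift b _ y]
  have hlen : (pvDigits (y.toNat + 1) b y).length = e + 1 :=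
    pv_digits_len b hb e y (y.toNat + 1) h1 h2 (by omega)
  have hdroplen : ((pvDigits (y.toNat + 1) b y).drop 1).length = e := by
    rw [List.length_drop, hlen]
    omega
  rw [hdroplen]
  by_cases hby : b ≤ y
  · have hds : pvDigits (y.toNat + 1) b y
        = PySem.Int.mod y b :: pvDigits y.toNat b (PySem.Int.floordiv y b) := by
      simp only [pvDigits, if_pos hby]
    have haw := pv_awhile_eq b hb (PySem.Int.floordiv y b).toNat (PySem.Int.floordiv y b) 0
      ((PySem.Int.floordiv y b).toNat + 1) y.toNat hq0 (by omega) (by omega) (by omega)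
    rw [hds]
    simp only [List.drop_succ_cons, List.drop_zero]
    rw [zero_mul, zero_add] at haw
    linarith
  · have he0 : e = 0 := by
      by_contra hne
      have h1e : 1 ≤ e := Nat.one_le_iff_ne_zero.2 hne
      have : b ^ 1 ≤ b ^ e := pow_le_pow_right₀ (by omega) h1e
      rw [pow_one] at this
      omega
    subst he0
    have hqz : PySem.Int.floordiv y b = 0 := by
      rw [PySem.Int.floordiv_eq_iff_of_pos (by omega)]
      constructor <;> omega
    have hds : pvDigits (y.toNat + 1) b y = [y] := by
      simp only [pvDigits, if_neg hby]
    have haw := pv_awhile_eq b hb (PySem.Int.floordiv y b).toNat (PySem.Int.floordiv y b) 0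
      ((PySem.Int.floordiv y b).toNat + 1) 1 hq0 (by omega) (by omega) (by omega)
    rw [hqz] at haw
    have hno : ¬ b ≤ (0:Int) := by omega
    simp only [pvDigits, if_neg hno] at haw
    simp only [List.length_cons, List.length_nil, List.foldl_cons, List.foldl_nil] at haw
    rw [hds]
    simp only [List.drop_succ_cons, List.drop_zero, List.foldl_nil]
    rw [hqz] at *
    omega

theorem pv_flatMap_congr {A B : Type} {l : List A} {f g : A → List B}
    (h : ∀ a ∈ l, f a = g a) : l.flatMap f = l.flatMap g := by
  induction l with
  | nil => rfl
  | cons a tl ih =>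
    simp only [List.flatMap_cons]
    rw [h a (by simp), ih (fun a' ha' => h a' (by simp [ha']))]

theorem pv_map_nil {f : Int → Int} {a c : Int} (h : c ≤ a) :
    (PySem.List.pyRange a c 1).map f = [] := by
  rw [PySem.List.pyRange_one_eq_nil h]
  rfl

theorem pv_main (l b : Int) (hpre : 0 ≤ b ∨ l ≤ 1) : paloddgen l b = paloddgen_alt l b := by
  by_cases hl : l > 0
  · simp only [paloddgen, paloddgen_alt, if_pos hl]
    congr 1
    by_cases hb : 2 ≤ b
    · apply pv_flatMap_congr
      intro x hx
      rw [PySem.List.mem_pyRange_one] at hx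
      have hx1 : 1 ≤ x := hx.1
      have hE : (x - 1).toNat + 1 = x.toNat := by omega
      have hpow : b ^ x.toNat = b ^ (x - 1).toNat * b := by
        rw [← hE, pow_succ]
      show (PySem.List.pyRange (b ^ (x - 1).toNat) (b ^ (x - 1).toNat * b) 1).map
          (fun y => y * b ^ (x - 1).toNat
            + b * (pvAwhile ((PySem.Int.floordiv y b).toNat + 1) b (PySem.Int.floordiv y b) 0).2
            + (pvAwhile ((PySem.Int.floordiv y b).toNat + 1) b (PySem.Int.floordiv y b) 0).1)
        = (PySem.List.pyRange (b ^ (x - 1).toNat) (b ^ x.toNat) 1).map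
          (fun y => ((pvDigits (y.toNat + 1) b y).reverse ++ (pvDigits (y.toNat + 1) b y).drop 1).foldl
            (fun v d => v * b + d) 0)
      rw [hpow]
      apply List.map_congr_left
      intro y hy
      rw [PySem.List.mem_pyRange_one] at hy
      exact pv_inner b hb ((x - 1).toNat) y hy.1 (by rw [pow_succ]; exact hy.2)
    · -- b ≤ 1 (and, if b < 0, l = 1): every inner range is empty on both sides
      have hcase : b = 0 ∨ b = 1 ∨ (b < 0 ∧ l = 1) := by omega
      refine Eq.trans (List.flatMap_eq_nil_iff.2 ?_) (List.flatMap_eq_nil_iff.2 ?_).symm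
      · -- A side
        intro x hx
        rw [PySem.List.mem_pyRange_one] at hx
        apply pv_map_nil
        rcases hcase with h0 | h1 | ⟨hneg, hl1⟩
        · subst h0
          rw [mul_zero]
          exact pow_nonneg le_rfl _
        · subst h1
          simp
        · have hx1 : x = 1 := by omega
          subst hx1
          norm_num
          omega
      · -- B side
        intro x hx
        rw [PySem.List.mem_pyRange_one] at hx
        apply pv_map_nil
        rcases hcase with h0 | h1 | ⟨hneg, hl1⟩
        · subst h0
          rw [zero_pow (show x.toNat ≠ 0 by omega)]
          exact pow_nonneg le_rfl _
        · subst h1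
          simp
        · have hx1 : x = 1 := by omega
          subst hx1
          norm_num
          omega
  · simp only [paloddgen, paloddgen_alt, if_neg hl]

-- ===== VERDICT (by name: the statement is the Claim_ definition above) =====
theorem paloddgen_spec : Claim_equal_paloddgen := by
  intro l b _ hpre
  exact pv_main l b hpre
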